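-- pv_equiv track=rewrite | github.com/HighwayofLife/basketball-stats-tracker | app/utils/scorebook_parser.py | calculate_team_score_from_players
-- ===== SOURCE A (Python) =====
-- from typing import Any
--
-- def calculate_points_from_notation(notation: str) -> int:
--     """
--     Calculate total points scored from scoring notation.
--
--     Args:
--         notation: String containing scoring notation
--
--     Returns:
--         Total points scored
--
--     Examples:
--         >>> calculate_points_from_notation("22-1x")
--         5
--
--         >>> calculate_points_from_notation("3/2")
--         5
--     """
--     if not notation:
--         return 0
--
--     points = 0
--     for char in notation.lower():
--         if char == "1":
--             points += 1  # Free throw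
--         elif char == "2":
--             points += 2  # 2-point shot
--         elif char == "3":
--             points += 3  # 3-point shot
--         # Misses don't add points
--
--     return points
--
-- def calculate_team_score_from_players(players_data: list[dict[str, Any]]) -> int:
--     """
--     Calculate total team score from multiple player scorebook entries.
--
--     Args:
--         players_data: List of player data dictionaries
--
--     Returns:
--         Total team score
--     """
--     total_score = 0
--
--     for player_data in players_data:
--         for quarter in range(1, 5):
--             quarter_key = f"qt{quarter}_shots"
--             notation = player_data.get(quarter_key, "")
--             total_score += calculate_points_from_notation(notation)
--
--     return total_score
-- ===== SOURCE B (Python) =====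
-- def calculate_team_score_from_players(players_data):
--     """Join-then-count: concatenate every quarter notation into one string,
--     then score it with three substring-count passes (misses contribute 0;
--     lowercasing never produces a digit, so it is unnecessary)."""
--     big = "".join(
--         player_data.get(key, "")
--         for player_data in players_data
--         for key in ("qt1_shots", "qt2_shots", "qt3_shots", "qt4_shots")
--     )
--     return big.count("1") + 2 * big.count("2") + 3 * big.count("3")
-- ===== Notes on version B (the rewrite author's own statement) =====
-- stated objective: alternative
-- what changed: B eliminates A's per-character conditional loop and per-player/per-quarter accumulation entirely: it concatenates all notations into one string and computes the score as big.count('1') + 2*big.count('2') + 3*big.count('3'), three staged substring-count passes (correct since lowercasing never maps a character to a digit).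
import Mathlib
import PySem

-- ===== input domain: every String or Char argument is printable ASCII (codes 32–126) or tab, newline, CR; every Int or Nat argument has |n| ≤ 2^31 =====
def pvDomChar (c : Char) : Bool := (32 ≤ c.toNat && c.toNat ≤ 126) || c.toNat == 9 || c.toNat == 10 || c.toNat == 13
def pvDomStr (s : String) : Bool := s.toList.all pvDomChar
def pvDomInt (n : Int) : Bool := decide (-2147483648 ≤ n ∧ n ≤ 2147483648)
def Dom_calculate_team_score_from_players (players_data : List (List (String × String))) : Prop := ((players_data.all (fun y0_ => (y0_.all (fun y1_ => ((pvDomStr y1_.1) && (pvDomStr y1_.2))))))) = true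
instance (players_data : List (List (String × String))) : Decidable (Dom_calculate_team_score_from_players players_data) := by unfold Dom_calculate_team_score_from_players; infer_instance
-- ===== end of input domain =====

-- B replaces A's per-character conditional loop and nested accumulation with
-- join-all-notations-then-three-count-passes; same cost, different algorithm shape.


-- ===== PORT A =====
def calculate_points_from_notation (nota : String) : Int :=
  if nota = "" then 0
  else
    (PySem.Str.lower nota).toList.foldl (fun points char =>
      if char = '1' then points + 1
      else if char = '2' then points + 2
      else if char = '3' then points + 3
      else points) 0

def calculate_team_score_from_players (players_data : List (List (String × String))) : Int :=
  players_data.foldl (fun total_score player_data =>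
    (PySem.List.pyRange 1 5 1).foldl (fun ts quarter =>
      ts + calculate_points_from_notation
        ((PySem.Dict.ofList player_data).getD ("qt" ++ PySem.Int.toStr quarter ++ "_shots") ""))
      total_score) 0

-- ===== PORT B =====
def calculate_team_score_from_players_alt (players_data : List (List (String × String))) : Int :=
  let big : String := PySem.Str.join ""
    (players_data.flatMap (fun player_data =>
      ["qt1_shots", "qt2_shots", "qt3_shots", "qt4_shots"].map (fun key =>
        (PySem.Dict.ofList player_data).getD key "")))
  (PySem.Str.count big "1" : Int) + 2 * (PySem.Str.count big "2" : Int)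
    + 3 * (PySem.Str.count big "3" : Int)

-- ===== PRECONDITION & SPEC =====
def Spec_calculate_team_score_from_players (players_data : List (List (String × String))) (out : Int) : Prop := out = calculate_team_score_from_players_alt players_data
instance (players_data : List (List (String × String))) (out : Int) : Decidable (Spec_calculate_team_score_from_players players_data out) := by unfold Spec_calculate_team_score_from_players; infer_instance

-- ===== CLAIM (what is proved, stated in full; the proofs are below) =====
def Claim_equal_calculate_team_score_from_players : Prop := ∀ (players_data : List (List (String × String))), Dom_calculate_team_score_from_players players_data → Spec_calculate_team_score_from_players players_data (calculate_team_score_from_players players_data)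

-- ===== LEMMAS AND PROOFS =====

-- the four notation strings one player contributes, in quarter order
def pvNotes (player_data : List (String × String)) : List String :=
  ["qt1_shots", "qt2_shots", "qt3_shots", "qt4_shots"].map (fun key =>
    (PySem.Dict.ofList player_data).getD key "")

-- PySem.Chars.count with a single-character needle is List.count
lemma pv_go_singleton (c : Char) : ∀ (l : List Char) (fuel acc : Nat), l.length ≤ fuel →
    PySem.Chars.count.go [c] fuel l acc = acc + l.count c := by
  intro l
  induction l with
  | nil => intro fuel acc _; cases fuel <;> simp [PySem.Chars.count.go]
  | cons h t ih =>
    intro fuel acc hle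
    cases fuel with
    | zero => simp at hle
    | succ n =>
      have ht : t.length ≤ n := by simpa using hle
      rw [PySem.Chars.count.go]
      by_cases hc : h = c
      · simp [hc, List.isPrefixOf, ih n (acc+1) ht]
        omega
      · simp [List.isPrefixOf, hc, Ne.symm hc, ih n acc ht]

lemma pv_count_singleton (cs : List Char) (c : Char) :
    PySem.Chars.count cs [c] = cs.count c := by
  simp [PySem.Chars.count, pv_go_singleton]

-- lowering never creates or destroys a digit character
lemma pv_lower_count (cs : List Char) (d : Char)
    (hd : d.toNat = 49 ∨ d.toNat = 50 ∨ d.toNat = 51) :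
    (PySem.Chars.lower cs).count d = cs.count d := by
  unfold PySem.Chars.lower
  rw [List.count_eq_countP, List.countP_map, List.count_eq_countP]
  apply List.countP_congr
  intro c _
  simp only [Function.comp_apply, beq_iff_eq]
  unfold PySem.Chars.lowerChar PySem.Chars.isupper
  split_ifs with h
  · simp at h
    have h1 : 65 ≤ c.toNat ∧ c.toNat ≤ 90 := ⟨h.1, h.2⟩
    have hv : (Char.ofNat (c.toNat + 32)).toNat = c.toNat + 32 := by
      rw [Char.toNat_ofNat, if_pos]
      left; omega
    constructor <;> intro he <;> exfalso
    · have := congrArg Char.toNat he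
      rw [hv] at this
      omega
    · have := congrArg Char.toNat he
      omega
  · rfl

lemma pv_pointsFold (l : List Char) (p : Int) :
    l.foldl (fun points char =>
      if char = '1' then points + 1
      else if char = '2' then points + 2
      else if char = '3' then points + 3
      else points) p
      = p + l.count '1' + 2 * (l.count '2' : Int) + 3 * (l.count '3' : Int) := by
  induction l generalizing p with
  | nil => simp
  | cons c l ih =>
    rw [List.foldl_cons, ih]
    simp only [List.count_cons]
    by_cases h1 : c = '1' <;> by_cases h2 : c = '2' <;> by_cases h3 : c = '3' <;>
      simp_all <;> ring_nf

-- A's helper, characterised by the raw digit counts of the notation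
lemma pv_cp_eq (n : String) :
    calculate_points_from_notation n
      = (n.toList.count '1' : Int) + 2 * (n.toList.count '2' : Int)
        + 3 * (n.toList.count '3' : Int) := by
  unfold calculate_points_from_notation
  by_cases h : n = ""
  · subst h; simp
  · rw [if_neg h, PySem.Str.toList_lower, pv_pointsFold,
        pv_lower_count _ _ (by decide), pv_lower_count _ _ (by decide),
        pv_lower_count _ _ (by decide)]
    ring

-- A's inner quarter loop = sum of the helper over the four notations
lemma pv_inner (player_data : List (String × String)) (t : Int) :
    (PySem.List.pyRange 1 5 1).foldl (fun ts quarter =>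
        ts + calculate_points_from_notation
          ((PySem.Dict.ofList player_data).getD ("qt" ++ PySem.Int.toStr quarter ++ "_shots") "")) t
      = t + ((pvNotes player_data).map calculate_points_from_notation).sum := by
  have hr : PySem.List.pyRange 1 5 1 = [(1 : Int), 2, 3, 4] := by decide
  have h1 : "qt" ++ PySem.Int.toStr 1 ++ "_shots" = "qt1_shots" := by decide
  have h2 : "qt" ++ PySem.Int.toStr 2 ++ "_shots" = "qt2_shots" := by decide
  have h3 : "qt" ++ PySem.Int.toStr 3 ++ "_shots" = "qt3_shots" := by decide
  have h4 : "qt" ++ PySem.Int.toStr 4 ++ "_shots" = "qt4_shots" := by decide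
  rw [hr]
  simp only [List.foldl_cons, List.foldl_nil, h1, h2, h3, h4, pvNotes,
    List.map_cons, List.map_nil, List.sum_cons, List.sum_nil]
  ring

-- A's outer loop = sum of per-player sums
lemma pv_outer (players : List (List (String × String))) (t : Int) :
    players.foldl (fun total_score player_data =>
      (PySem.List.pyRange 1 5 1).foldl (fun ts quarter =>
        ts + calculate_points_from_notation
          ((PySem.Dict.ofList player_data).getD ("qt" ++ PySem.Int.toStr quarter ++ "_shots") ""))
        total_score) t
    = t + ((players.flatMap pvNotes).map calculate_points_from_notation).sum := by
  induction players generalizing t with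
  | nil => simp
  | cons p ps ih =>
    rw [List.foldl_cons, ih, pv_inner]
    simp
    ring

-- B's three weighted counts of the concatenation = the same sum
lemma pv_b_sum (l : List String) :
    ((l.map String.toList).flatten.count '1' : Int)
      + 2 * ((l.map String.toList).flatten.count '2' : Int)
      + 3 * ((l.map String.toList).flatten.count '3' : Int)
      = (l.map calculate_points_from_notation).sum := by
  induction l with
  | nil => simp
  | cons n l ih =>
    simp only [List.map_cons, List.flatten_cons, List.count_append, List.sum_cons, pv_cp_eq, ← ih]
    push_cast
    ring

lemma pv_join_empty (l : List (List Char)) : PySem.Chars.join [] l = l.flatten := by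
  simp [PySem.Chars.join, List.intercalate]
  induction l with
  | nil => rfl
  | cons a t ih => cases t <;> simp_all [List.intersperse]

-- ===== VERDICT (by name: the statement is the Claim_ definition above) =====
theorem calculate_team_score_from_players_spec : Claim_equal_calculate_team_score_from_players := by
  intro players_data _
  show calculate_team_score_from_players players_data
      = calculate_team_score_from_players_alt players_data
  unfold calculate_team_score_from_players calculate_team_score_from_players_alt
  rw [pv_outer]
  simp only [PySem.Str.count_eq, PySem.Str.toList_join]
  rw [show ("" : String).toList = ([] : List Char) from rfl, pv_join_empty]
  rw [show ("1" : String).toList = ['1'] from rfl, show ("2" : String).toList = ['2'] from rfl,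
      show ("3" : String).toList = ['3'] from rfl,
      pv_count_singleton, pv_count_singleton, pv_count_singleton]
  rw [show (players_data.flatMap fun player_data =>
        ["qt1_shots", "qt2_shots", "qt3_shots", "qt4_shots"].map fun key =>
          (PySem.Dict.ofList player_data).getD key "") = players_data.flatMap pvNotes from rfl]
  rw [pv_b_sum]
  ring
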